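-- pv_equiv track=rewrite | github.com/PastyPurpleTrolls/game-contest-server | examples/checkers/test-players/player16.py | moveClosestKingRow
-- ===== SOURCE A (Python) =====
-- def moveClosestKingRow(validMoves,validJumps,board,playerIndex,playerTokens,opponentTokens,rowInc):
--     if rowInc>0:
--         kingRow=7
--     else:
--         kingRow=0
--     lst=[]
--
--     closestList = []
--     for mve in validMoves:
--         closestList.append(ord(mve[-2])-65)
--
--     if  closestList != []:
--         if kingRow == 7:
--             lst.append(validMoves[closestList.index(max(closestList))])
--         if kingRow == 0:
--             lst.append(validMoves[closestList.index(min(closestList))])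
--
--     return lst
-- ===== SOURCE B (Python) =====
-- def moveClosestKingRow(validMoves, validJumps, board, playerIndex, playerTokens, opponentTokens, rowInc):
--     # Rank all moves by the row letter of their destination (stable sort keeps the
--     # earliest move among ties first), descending when heading toward row 7,
--     # ascending toward row 0; the answer is the first ranked move (or [] if none).
--     ranked = sorted(validMoves, key=lambda m: ord(m[-2]), reverse=rowInc > 0)
--     return ranked[:1]
-- ===== Notes on version B (the rewrite author's own statement) =====
-- stated objective: alternative
-- what changed: Replaces A's parallel ord-list build plus max/min plus .index re-indexing by stable-sorting the moves by ord(m[-2]) (descending iff rowInc>0) and slicing off the first ranked move; stability makes ties resolve to the first occurrence exactly as A's .index does.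
-- outside the precondition, e.g. on moveClosestKingRow(['A'], [], [], 0, [], [], 1): A raises IndexError, B raises IndexError
import Mathlib
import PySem

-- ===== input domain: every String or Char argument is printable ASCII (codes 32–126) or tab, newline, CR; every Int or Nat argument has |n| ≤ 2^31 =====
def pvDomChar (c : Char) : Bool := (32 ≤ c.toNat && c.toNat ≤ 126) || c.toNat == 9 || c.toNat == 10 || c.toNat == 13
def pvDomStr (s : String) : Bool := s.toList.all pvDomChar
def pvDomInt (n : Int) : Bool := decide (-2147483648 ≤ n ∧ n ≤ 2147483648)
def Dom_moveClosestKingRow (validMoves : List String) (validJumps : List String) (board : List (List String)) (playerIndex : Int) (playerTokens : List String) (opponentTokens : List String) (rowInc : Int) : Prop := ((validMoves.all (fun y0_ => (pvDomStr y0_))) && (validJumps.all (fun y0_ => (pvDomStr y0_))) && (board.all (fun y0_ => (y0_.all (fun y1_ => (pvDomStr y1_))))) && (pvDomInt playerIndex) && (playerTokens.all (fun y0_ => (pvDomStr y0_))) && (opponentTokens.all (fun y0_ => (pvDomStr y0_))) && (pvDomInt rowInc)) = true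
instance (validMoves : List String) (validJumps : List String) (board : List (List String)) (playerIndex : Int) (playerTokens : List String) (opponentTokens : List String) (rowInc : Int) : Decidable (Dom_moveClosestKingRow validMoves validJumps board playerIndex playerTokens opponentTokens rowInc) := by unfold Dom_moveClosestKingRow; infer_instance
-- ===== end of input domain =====

-- B replaces A's parallel ord-list + max/min + .index + re-index structure by a stable sort of the
-- moves keyed on ord(m[-2]) (descending iff rowInc>0) followed by taking the first ranked move;
-- objective: alternative (sort-then-pick instead of scan-and-index).

-- ===== PORT A =====
-- ord(mve[-2]) as an Int (default only reached outside Pre_, where Python raises IndexError)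
def pvOrd2 (m : String) : Int := (((PySem.Str.pyGet? m (-2)).getD ' ').toNat : Int)
-- ord(mve[-2]) - 65, the entries of A's closestList
def pvKeyA (m : String) : Int := pvOrd2 m - 65

def moveClosestKingRow (validMoves : List String) (validJumps : List String) (board : List (List String)) (playerIndex : Int) (playerTokens : List String) (opponentTokens : List String) (rowInc : Int) : List String :=
  let kingRow : Int := if rowInc > 0 then 7 else 0
  let lst : List String := []
  let closestList : List Int := validMoves.foldl (fun acc mve => acc ++ [pvKeyA mve]) []
  if closestList ≠ [] then
    let lst := if kingRow = 7 then
        lst ++ [(PySem.List.pyGet? validMoves (((PySem.List.index? closestList ((PySem.List.max? closestList (fun x => x)).getD 0)).getD 0 : Nat) : Int)).getD ""]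
      else lst
    let lst := if kingRow = 0 then
        lst ++ [(PySem.List.pyGet? validMoves (((PySem.List.index? closestList ((PySem.List.min? closestList (fun x => x)).getD 0)).getD 0 : Nat) : Int)).getD ""]
      else lst
    lst
  else lst

-- ===== PORT B =====
-- ranked[:1] is ported as List.take 1, exact for a nonnegative slice bound.
def moveClosestKingRow_alt (validMoves : List String) (validJumps : List String) (board : List (List String)) (playerIndex : Int) (playerTokens : List String) (opponentTokens : List String) (rowInc : Int) : List String :=
  let ranked := PySem.List.sorted validMoves pvOrd2 (decide (rowInc > 0))
  ranked.take 1

-- ===== PRECONDITION & SPEC =====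
-- Pre_ excludes moves shorter than 2 characters: there mve[-2] raises IndexError in A (and in B).
def Pre_moveClosestKingRow (validMoves : List String) (validJumps : List String) (board : List (List String)) (playerIndex : Int) (playerTokens : List String) (opponentTokens : List String) (rowInc : Int) : Prop :=
  ∀ m ∈ validMoves, 2 ≤ m.length
instance (validMoves : List String) (validJumps : List String) (board : List (List String)) (playerIndex : Int) (playerTokens : List String) (opponentTokens : List String) (rowInc : Int) : Decidable (Pre_moveClosestKingRow validMoves validJumps board playerIndex playerTokens opponentTokens rowInc) := by unfold Pre_moveClosestKingRow; infer_instance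
def pvWitness_moveClosestKingRow : List String × List String × List (List String) × Int × List String × List String × Int :=
  (["C3", "A5", "B4"], [], [], 0, [], [], 1)

def Spec_moveClosestKingRow (validMoves : List String) (validJumps : List String) (board : List (List String)) (playerIndex : Int) (playerTokens : List String) (opponentTokens : List String) (rowInc : Int) (out : List String) : Prop := out = moveClosestKingRow_alt validMoves validJumps board playerIndex playerTokens opponentTokens rowInc
instance (validMoves : List String) (validJumps : List String) (board : List (List String)) (playerIndex : Int) (playerTokens : List String) (opponentTokens : List String) (rowInc : Int) (out : List String) : Decidable (Spec_moveClosestKingRow validMoves validJumps board playerIndex playerTokens opponentTokens rowInc out) := by unfold Spec_moveClosestKingRow; infer_instance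

-- ===== CLAIM (what is proved, stated in full; the proofs are below) =====
def Claim_equal_moveClosestKingRow : Prop := ∀ (validMoves : List String) (validJumps : List String) (board : List (List String)) (playerIndex : Int) (playerTokens : List String) (opponentTokens : List String) (rowInc : Int), Dom_moveClosestKingRow validMoves validJumps board playerIndex playerTokens opponentTokens rowInc → Pre_moveClosestKingRow validMoves validJumps board playerIndex playerTokens opponentTokens rowInc → Spec_moveClosestKingRow validMoves validJumps board playerIndex playerTokens opponentTokens rowInc (moveClosestKingRow validMoves validJumps board playerIndex playerTokens opponentTokens rowInc)

-- ===== LEMMAS AND PROOFS =====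

-- max? keeps the FIRST maximum: decomposition of the inner foldl
theorem pv_max_foldl_first {α : Type} (k : α → Int) :
    ∀ (t : List α) (cur m : α),
      t.foldl (fun acc x => match acc with
        | none => some x
        | some mm => if k mm < k x then some x else some mm) (some cur) = some m →
      m = cur ∨ ∃ pre suf, t = pre ++ m :: suf ∧ k cur < k m ∧ ∀ x ∈ pre, k x < k m := by
  intro t
  induction t with
  | nil => intro cur m h; simp at h; exact Or.inl h.symm
  | cons x t ih =>
    intro cur m h
    simp only [List.foldl_cons] at h
    by_cases hc : k cur < k x
    · simp only [hc, if_pos] at h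
      rcases ih x m h with rfl | ⟨pre, suf, ht, hx, hpre⟩
      · exact Or.inr ⟨[], t, rfl, hc, by simp⟩
      · refine Or.inr ⟨x :: pre, suf, by simp [ht], lt_trans hc hx, ?_⟩
        intro y hy
        rcases List.mem_cons.mp hy with rfl | hy
        · exact hx
        · exact hpre y hy
    · simp only [hc, if_neg, if_false] at h
      rcases ih cur m h with rfl | ⟨pre, suf, ht, hcur, hpre⟩
      · exact Or.inl rfl
      · refine Or.inr ⟨x :: pre, suf, by simp [ht], hcur, ?_⟩
        intro y hy
        rcases List.mem_cons.mp hy with rfl | hy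
        · exact lt_of_le_of_lt (le_of_not_gt hc) hcur
        · exact hpre y hy

theorem pv_min_foldl_first {α : Type} (k : α → Int) :
    ∀ (t : List α) (cur m : α),
      t.foldl (fun acc x => match acc with
        | none => some x
        | some mm => if k x < k mm then some x else some mm) (some cur) = some m →
      m = cur ∨ ∃ pre suf, t = pre ++ m :: suf ∧ k m < k cur ∧ ∀ x ∈ pre, k m < k x := by
  intro t
  induction t with
  | nil => intro cur m h; simp at h; exact Or.inl h.symm
  | cons x t ih =>
    intro cur m h
    simp only [List.foldl_cons] at h
    by_cases hc : k x < k cur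
    · simp only [hc, if_pos] at h
      rcases ih x m h with rfl | ⟨pre, suf, ht, hx, hpre⟩
      · exact Or.inr ⟨[], t, rfl, hc, by simp⟩
      · refine Or.inr ⟨x :: pre, suf, by simp [ht], lt_trans hx hc, ?_⟩
        intro y hy
        rcases List.mem_cons.mp hy with rfl | hy
        · exact hx
        · exact hpre y hy
    · simp only [hc, if_neg, if_false] at h
      rcases ih cur m h with rfl | ⟨pre, suf, ht, hcur, hpre⟩
      · exact Or.inl rfl
      · refine Or.inr ⟨x :: pre, suf, by simp [ht], hcur, ?_⟩
        intro y hy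
        rcases List.mem_cons.mp hy with rfl | hy
        · exact lt_of_lt_of_le hcur (le_of_not_gt hc)
        · exact hpre y hy

theorem pv_max?_first {α : Type} (k : α → Int) (l : List α) (m : α)
    (h : PySem.List.max? l k = some m) :
    ∃ pre suf, l = pre ++ m :: suf ∧ ∀ x ∈ pre, k x < k m := by
  cases l with
  | nil => simp [PySem.List.max?] at h
  | cons a t =>
    have h' : t.foldl (fun acc x => match acc with
        | none => some x
        | some mm => if k mm < k x then some x else some mm) (some a) = some m := by
      simpa [PySem.List.max?, List.foldl_cons] using h
    rcases pv_max_foldl_first k t a m h' with rfl | ⟨pre, suf, ht, ha, hpre⟩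
    · exact ⟨[], t, rfl, by simp⟩
    · refine ⟨a :: pre, suf, by simp [ht], ?_⟩
      intro y hy
      rcases List.mem_cons.mp hy with rfl | hy
      · exact ha
      · exact hpre y hy

theorem pv_min?_first {α : Type} (k : α → Int) (l : List α) (m : α)
    (h : PySem.List.min? l k = some m) :
    ∃ pre suf, l = pre ++ m :: suf ∧ ∀ x ∈ pre, k m < k x := by
  cases l with
  | nil => simp [PySem.List.min?] at h
  | cons a t =>
    have h' : t.foldl (fun acc x => match acc with
        | none => some x
        | some mm => if k x < k mm then some x else some mm) (some a) = some m := by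
      simpa [PySem.List.min?, List.foldl_cons] using h
    rcases pv_min_foldl_first k t a m h' with rfl | ⟨pre, suf, ht, ha, hpre⟩
    · exact ⟨[], t, rfl, by simp⟩
    · refine ⟨a :: pre, suf, by simp [ht], ?_⟩
      intro y hy
      rcases List.mem_cons.mp hy with rfl | hy
      · exact ha
      · exact hpre y hy

-- value of max?/min? over the key list equals the key of the first extremal move
theorem pv_max_val (k : String → Int) (l : List String) (m : String) (v : Int)
    (hm : m ∈ l) (hmax : ∀ y ∈ l, k y ≤ k m)
    (hv : PySem.List.max? (l.map k) (fun x => x) = some v) : v = k m := by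
  have h1 : v ∈ l.map k := PySem.List.max?_mem hv
  rcases List.mem_map.mp h1 with ⟨x, hx, rfl⟩
  have h2 : k m ≤ k x := PySem.List.max?_isMax hv (k m) (List.mem_map.mpr ⟨m, hm, rfl⟩)
  exact le_antisymm (hmax x hx) h2

theorem pv_min_val (k : String → Int) (l : List String) (m : String) (v : Int)
    (hm : m ∈ l) (hmin : ∀ y ∈ l, k m ≤ k y)
    (hv : PySem.List.min? (l.map k) (fun x => x) = some v) : v = k m := by
  have h1 : v ∈ l.map k := PySem.List.min?_mem hv
  rcases List.mem_map.mp h1 with ⟨x, hx, rfl⟩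
  have h2 : k x ≤ k m := PySem.List.min?_isMin hv (k m) (List.mem_map.mpr ⟨m, hm, rfl⟩)
  exact le_antisymm h2 (hmin x hx)

theorem pv_index_append (v : Int) :
    ∀ (pre suf : List Int), (∀ x ∈ pre, x ≠ v) →
      PySem.List.index? (pre ++ v :: suf) v = some pre.length := by
  intro pre
  induction pre with
  | nil => intro suf _; simpa using PySem.List.index?_cons_self v suf
  | cons a pre ih =>
    intro suf h
    have ha : a ≠ v := h a (List.mem_cons_self)
    rw [List.cons_append, PySem.List.index?_cons_of_ne _ ha,
        ih suf (fun x hx => h x (List.mem_cons_of_mem a hx))]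
    simp

-- the core of the A side: A's index-back pick equals the first extremal move
theorem pv_pick_max (l : List String) (m : String)
    (h : PySem.List.max? l pvOrd2 = some m) :
    (PySem.List.pyGet? l (((PySem.List.index? (l.map pvKeyA)
        ((PySem.List.max? (l.map pvKeyA) (fun x => x)).getD 0)).getD 0 : Nat) : Int)).getD "" = m := by
  rcases pv_max?_first pvOrd2 l m h with ⟨pre, suf, rfl, hpre⟩
  have hmax : ∀ y ∈ pre ++ m :: suf, pvOrd2 y ≤ pvOrd2 m :=
    fun y hy => PySem.List.max?_isMax h y hy
  have hm : m ∈ pre ++ m :: suf := by simp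
  obtain ⟨v, hv⟩ : ∃ v, PySem.List.max? ((pre ++ m :: suf).map pvKeyA) (fun x => x) = some v := by
    cases hvv : PySem.List.max? ((pre ++ m :: suf).map pvKeyA) (fun x => x) with
    | none => simp [PySem.List.max?_eq_none_iff] at hvv
    | some v => exact ⟨v, rfl⟩
  have hveq : v = pvKeyA m := by
    refine pv_max_val pvKeyA _ m v hm ?_ hv
    intro y hy
    have := hmax y hy
    simp only [pvKeyA] at *
    omega
  have hmap : (pre ++ m :: suf).map pvKeyA = pre.map pvKeyA ++ pvKeyA m :: suf.map pvKeyA := by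
    simp
  have hidx : PySem.List.index? (pre.map pvKeyA ++ pvKeyA m :: suf.map pvKeyA) (pvKeyA m)
      = some (pre.map pvKeyA).length := by
    refine pv_index_append (pvKeyA m) _ _ ?_
    intro x hx
    rcases List.mem_map.mp hx with ⟨y, hy, rfl⟩
    have := hpre y hy
    simp only [pvKeyA] at *
    omega
  rw [hv, hmap]
  simp only [Option.getD_some, hveq, hidx, List.length_map]
  rw [PySem.List.pyGet?_append_length]
  simp

theorem pv_pick_min (l : List String) (m : String)
    (h : PySem.List.min? l pvOrd2 = some m) :
    (PySem.List.pyGet? l (((PySem.List.index? (l.map pvKeyA)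
        ((PySem.List.min? (l.map pvKeyA) (fun x => x)).getD 0)).getD 0 : Nat) : Int)).getD "" = m := by
  rcases pv_min?_first pvOrd2 l m h with ⟨pre, suf, rfl, hpre⟩
  have hmin : ∀ y ∈ pre ++ m :: suf, pvOrd2 m ≤ pvOrd2 y :=
    fun y hy => PySem.List.min?_isMin h y hy
  have hm : m ∈ pre ++ m :: suf := by simp
  obtain ⟨v, hv⟩ : ∃ v, PySem.List.min? ((pre ++ m :: suf).map pvKeyA) (fun x => x) = some v := by
    cases hvv : PySem.List.min? ((pre ++ m :: suf).map pvKeyA) (fun x => x) with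
    | none => simp [PySem.List.min?_eq_none_iff] at hvv
    | some v => exact ⟨v, rfl⟩
  have hveq : v = pvKeyA m := by
    refine pv_min_val pvKeyA _ m v hm ?_ hv
    intro y hy
    have := hmin y hy
    simp only [pvKeyA] at *
    omega
  have hmap : (pre ++ m :: suf).map pvKeyA = pre.map pvKeyA ++ pvKeyA m :: suf.map pvKeyA := by
    simp
  have hidx : PySem.List.index? (pre.map pvKeyA ++ pvKeyA m :: suf.map pvKeyA) (pvKeyA m)
      = some (pre.map pvKeyA).length := by
    refine pv_index_append (pvKeyA m) _ _ ?_
    intro x hx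
    rcases List.mem_map.mp hx with ⟨y, hy, rfl⟩
    have := hpre y hy
    simp only [pvKeyA] at *
    omega
  rw [hv, hmap]
  simp only [Option.getD_some, hveq, hidx, List.length_map]
  rw [PySem.List.pyGet?_append_length]
  simp

-- ===== B side: the head of the stable insertion sort is the first extremal element =====

-- head of insertBy: the new element lands in front iff it is 'before' the old head
theorem pv_head_insertBy {α : Type} (before : α → α → Bool) (x : α) :
    ∀ (ys : List α), (PySem.List.insertBy before x ys).head? =
      some (match ys with | [] => x | y :: _ => if before x y then x else y) := by
  intro ys
  cases ys with
  | nil => simp [PySem.List.insertBy]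
  | cons y t =>
    by_cases h : before x y
    · simp [PySem.List.insertBy, h]
    · simp [PySem.List.insertBy, h]

-- head of the insertBy fold = the option fold that keeps the first 'before'-extremal element
theorem pv_head_foldl_insertBy {α : Type} (before : α → α → Bool) :
    ∀ (t : List α) (acc : List α) (m : α), acc.head? = some m →
      (t.foldl (fun acc x => PySem.List.insertBy before x acc) acc).head? =
      t.foldl (fun o x => match o with
        | none => some x
        | some mm => if before x mm then some x else some mm) (some m) := by
  intro t
  induction t with
  | nil => intro acc m h; simpa using h
  | cons x t ih =>
    intro acc m h
    cases acc with
    | nil => simp at h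
    | cons a rest =>
      have ha : a = m := by simpa using h
      subst ha
      simp only [List.foldl_cons]
      by_cases hb : before x a
      · have : (PySem.List.insertBy before x (a :: rest)).head? = some x := by
          rw [pv_head_insertBy]; simp [hb]
        rw [ih _ x this]; simp [hb]
      · have : (PySem.List.insertBy before x (a :: rest)).head? = some a := by
          rw [pv_head_insertBy]; simp [hb]
        rw [ih _ a this]; simp [hb]

-- head of the ascending sort is min? (the first minimum)
theorem pv_sorted_head_min (k : String → Int) (l : List String) :
    (PySem.List.sorted l k false).head? = PySem.List.min? l k := by
  cases l with
  | nil => simp [PySem.List.sorted, PySem.List.min?]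
  | cons a t =>
    rw [PySem.List.sorted_eq_foldl_insertBy]
    simp only [List.foldl_cons]
    have h0 : (PySem.List.insertBy (fun x y => decide (k x < k y)) a []).head? = some a := by
      simp [PySem.List.insertBy]
    rw [pv_head_foldl_insertBy _ t _ a h0]
    show _ = List.foldl _ none (a :: t)
    rw [List.foldl_cons]
    apply List.foldl_ext
    intro o x _
    cases o with
    | none => rfl
    | some mm => by_cases h : k x < k mm <;> simp [h]

-- head of the descending sort is max? (the first maximum)
theorem pv_sorted_head_max (k : String → Int) (l : List String) :
    (PySem.List.sorted l k true).head? = PySem.List.max? l k := by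
  cases l with
  | nil => simp [PySem.List.sorted, PySem.List.max?]
  | cons a t =>
    rw [PySem.List.sorted_rev_eq_foldl_insertBy]
    simp only [List.foldl_cons]
    have h0 : (PySem.List.insertBy (fun x y => decide (k y < k x)) a []).head? = some a := by
      simp [PySem.List.insertBy]
    rw [pv_head_foldl_insertBy _ t _ a h0]
    show _ = List.foldl _ none (a :: t)
    rw [List.foldl_cons]
    apply List.foldl_ext
    intro o x _
    cases o with
    | none => rfl
    | some mm => by_cases h : k mm < k x <;> simp [h]

theorem pv_take1_of_head? {α : Type} (l : List α) (m : α) (h : l.head? = some m) :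
    l.take 1 = [m] := by
  cases l with
  | nil => simp at h
  | cons a t => simp at h; simp [h]

-- ===== VERDICT (by name: the statement is the Claim_ definition above) =====
theorem moveClosestKingRow_spec : Claim_equal_moveClosestKingRow := by
  intro validMoves validJumps board playerIndex playerTokens opponentTokens rowInc _ _
  unfold Spec_moveClosestKingRow moveClosestKingRow moveClosestKingRow_alt
  by_cases hl : validMoves = []
  · subst hl; simp [PySem.List.sorted]
  · have hclosest : validMoves.foldl (fun acc mve => acc ++ [pvKeyA mve]) [] = validMoves.map pvKeyA := by
      simpa using PySem.List.foldl_append_singleton_eq_map pvKeyA validMoves []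
    rw [hclosest]
    have hmapne : validMoves.map pvKeyA ≠ [] := by simpa using hl
    by_cases hr : rowInc > 0
    · obtain ⟨m, hm⟩ : ∃ m, PySem.List.max? validMoves pvOrd2 = some m := by
        cases hmm : PySem.List.max? validMoves pvOrd2 with
        | none => exact absurd ((PySem.List.max?_eq_none_iff _ _).mp hmm) hl
        | some m => exact ⟨m, rfl⟩
      have hhead : (PySem.List.sorted validMoves pvOrd2 (decide (rowInc > 0))).head? = some m := by
        rw [show (decide (rowInc > 0)) = true by simp [hr], pv_sorted_head_max, hm]
      rw [pv_take1_of_head? _ _ hhead]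
      simp only [hr, if_pos, if_true, hmapne, ne_eq, not_false_iff]
      simp only [show (7 : Int) ≠ 0 by decide, if_false, if_true]
      rw [pv_pick_max validMoves m hm]
      simp
    · obtain ⟨m, hm⟩ : ∃ m, PySem.List.min? validMoves pvOrd2 = some m := by
        cases hmm : PySem.List.min? validMoves pvOrd2 with
        | none => exact absurd ((PySem.List.min?_eq_none_iff _ _).mp hmm) hl
        | some m => exact ⟨m, rfl⟩
      have hhead : (PySem.List.sorted validMoves pvOrd2 (decide (rowInc > 0))).head? = some m := by
        rw [show (decide (rowInc > 0)) = false by simp [hr], pv_sorted_head_min, hm]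
      rw [pv_take1_of_head? _ _ hhead]
      simp only [hr, if_neg, if_false, hmapne, ne_eq, not_false_iff]
      rw [pv_pick_min validMoves m hm]
      simp
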